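-- pv_equiv track=rewrite | github.com/bearojas/RP-Optimize-a-data-center | toolsRP.py | possible_slots
-- ===== SOURCE A (Python) =====
-- def possible_slots(dataCenter, server, first = 0):
--     nbRows = len(dataCenter)
--     nbSlots = len(dataCenter[0])
--     size = server[1]
--     Lm = []
--
--     #pour chaque slot de chaque rangee
--     #on regarde si on peut placer le serveur de taille "size"
--     for row in range(nbRows):
--         for slot in range(nbSlots):
--             for s in range(size):
--                 if slot+s >= nbSlots or dataCenter[row][slot+s] == 'X':
--                     s = -1
--                     break
--             #s'il y a assez de place
--             if s == size - 1:
--                 Lm.append([row, slot])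
--                 if(first):
--                     return Lm
--
--     return Lm
-- ===== SOURCE B (Python) =====
-- def possible_slots(dataCenter, server, first=0):
--     nbSlots = len(dataCenter[0])
--     size = server[1]
--     Lm = []
--     for row, r in enumerate(dataCenter):
--         # suffix free-run lengths: runs[slot] = number of consecutive non-'X'
--         # cells starting at slot (within the first nbSlots columns)
--         runs = [0] * nbSlots
--         run = 0
--         for slot in range(nbSlots - 1, -1, -1):
--             run = 0 if r[slot] == 'X' else run + 1
--             runs[slot] = run
--         for slot in range(nbSlots):
--             if runs[slot] >= size:
--                 Lm.append([row, slot])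
--                 if first:
--                     return Lm
--     return Lm
-- ===== Notes on version B (the rewrite author's own statement) =====
-- stated objective: faster
-- what changed: Replaced the per-slot inner rescan of up to `size` cells by one backward suffix free-run-length pass per row, then a single comparison run[slot] >= size per slot.
-- outside the precondition, e.g. on possible_slots([['O', 'O'], ['O']], (0, 1), 1): A returns [[0, 0]], B returns [[0, 0]]
import Mathlib
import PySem

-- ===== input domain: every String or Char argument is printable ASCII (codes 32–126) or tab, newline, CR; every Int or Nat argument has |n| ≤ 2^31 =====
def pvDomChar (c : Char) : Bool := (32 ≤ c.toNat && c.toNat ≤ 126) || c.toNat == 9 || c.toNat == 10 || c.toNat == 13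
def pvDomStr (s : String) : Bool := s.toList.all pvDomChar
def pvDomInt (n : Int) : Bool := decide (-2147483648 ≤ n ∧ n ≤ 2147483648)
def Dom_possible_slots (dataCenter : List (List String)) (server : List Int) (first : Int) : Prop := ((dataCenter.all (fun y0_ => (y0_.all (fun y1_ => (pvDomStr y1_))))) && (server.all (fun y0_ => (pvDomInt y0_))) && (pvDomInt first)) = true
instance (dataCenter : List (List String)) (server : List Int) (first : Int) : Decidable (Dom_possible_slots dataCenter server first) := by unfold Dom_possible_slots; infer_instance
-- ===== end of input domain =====

-- B replaces A's per-slot rescan of up to `size` cells by one backward suffix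
-- free-run-length pass per row followed by a single comparison per slot (objective: faster).

-- ===== PORT A =====
-- inner `for s in range(size)` loop: returns the final value of Python's `s`
-- (-1 on break, size-1 on normal completion; size ≥ 1 under Pre_, so the
-- size ≤ 0 NameError case is excluded by Pre_ and the port just returns size-1 there)
def innerA (r : List String) (nbSlots slot : Nat) (size s : Int) : Int :=
  if _h : s < size then
    if (nbSlots : Int) ≤ (slot : Int) + s ∨ r.getD ((slot : Int) + s).toNat "" = "X" then -1
    else innerA r nbSlots slot size (s + 1)
  else size - 1
termination_by (size - s).toNat
decreasing_by omega

-- `for slot in range(nbSlots)` loop; Bool = Python's early `return Lm` fired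
def slotLoopA (dataCenter : List (List String)) (row nbSlots : Nat) (size first : Int)
    (slot : Nat) (acc : List (List Int)) : List (List Int) × Bool :=
  if _h : slot < nbSlots then
    if innerA (dataCenter.getD row []) nbSlots slot size 0 = size - 1 then
      let acc2 := acc ++ [[(row : Int), (slot : Int)]]
      if first ≠ 0 then (acc2, true)
      else slotLoopA dataCenter row nbSlots size first (slot + 1) acc2
    else slotLoopA dataCenter row nbSlots size first (slot + 1) acc
  else (acc, false)
termination_by nbSlots - slot
decreasing_by all_goals omega

-- `for row in range(nbRows)` loop
def rowLoopA (dataCenter : List (List String)) (nbRows nbSlots : Nat) (size first : Int)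
    (row : Nat) (acc : List (List Int)) : List (List Int) :=
  if _h : row < nbRows then
    match slotLoopA dataCenter row nbSlots size first 0 acc with
    | (acc2, true) => acc2
    | (acc2, false) => rowLoopA dataCenter nbRows nbSlots size first (row + 1) acc2
  else acc
termination_by nbRows - row
decreasing_by omega

def possible_slots (dataCenter : List (List String)) (server : List Int) (first : Int) : List (List Int) :=
  let nbRows := dataCenter.length
  let nbSlots := (dataCenter.headD []).length   -- dataCenter[0]; empty dataCenter raises, excluded by Pre_
  let size := PySem.List.pyGetD server 1 0      -- server[1]; len(server) < 2 raises, excluded by Pre_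
  rowLoopA dataCenter nbRows nbSlots size first 0 []

-- ===== PORT B =====
-- backward pass `for slot in range(nbSlots-1, -1, -1)` building runs[]:
-- runs[i] = length of the run of non-'X' cells starting at i
def runsB : List String → List Nat
  | [] => []
  | c :: rest =>
    let rs := runsB rest
    (if c = "X" then 0 else rs.headD 0 + 1) :: rs

-- forward pass `for slot in range(nbSlots)` over runs[]; Bool = early `return Lm` fired
def collectB (row : Nat) (size first : Int) :
    List Nat → Nat → List (List Int) → List (List Int) × Bool
  | [], _, acc => (acc, false)
  | k :: rest, slot, acc =>
    if size ≤ (k : Int) then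
      let acc2 := acc ++ [[(row : Int), (slot : Int)]]
      if first ≠ 0 then (acc2, true) else collectB row size first rest (slot + 1) acc2
    else collectB row size first rest (slot + 1) acc

-- `for row, r in enumerate(dataCenter)`; r.take nbSlots = the nbSlots cells Source B reads
-- (a row shorter than nbSlots makes Source B raise IndexError; excluded by Pre_)
def rowsB (nbSlots : Nat) (size first : Int) :
    List (List String) → Nat → List (List Int) → List (List Int)
  | [], _, acc => acc
  | r :: rest, row, acc =>
    match collectB row size first (runsB (r.take nbSlots)) 0 acc with
    | (acc2, true) => acc2
    | (acc2, false) => rowsB nbSlots size first rest (row + 1) acc2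

def possible_slots_alt (dataCenter : List (List String)) (server : List Int) (first : Int) : List (List Int) :=
  let nbSlots := (dataCenter.headD []).length
  let size := PySem.List.pyGetD server 1 0
  rowsB nbSlots size first dataCenter 0 []

-- ===== PRECONDITION & SPEC =====
-- Pre_ excludes exactly the inputs where the Python raises: empty dataCenter (IndexError on
-- dataCenter[0]), len(server) < 2 (IndexError on server[1]), server[1] ≤ 0 (NameError: the inner
-- loop body never runs and `s` is unbound), and ragged grids with a row shorter than row 0
-- (IndexError when the scan reaches the missing cells; on such grids an occasional early
-- `return` before the short row is an accident of traversal order, also excluded).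
def Pre_possible_slots (dataCenter : List (List String)) (server : List Int) (first : Int) : Prop :=
  dataCenter ≠ [] ∧ 2 ≤ server.length ∧ 1 ≤ server.getD 1 0 ∧
    ∀ r ∈ dataCenter, (dataCenter.headD []).length ≤ r.length
instance (dataCenter : List (List String)) (server : List Int) (first : Int) : Decidable (Pre_possible_slots dataCenter server first) := by unfold Pre_possible_slots; infer_instance

def pvWitness_possible_slots : List (List String) × List Int × Int :=
  ([["O", "X"], ["O", "O"]], [0, 1], 0)

def Spec_possible_slots (dataCenter : List (List String)) (server : List Int) (first : Int) (out : List (List Int)) : Prop := out = possible_slots_alt dataCenter server first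
instance (dataCenter : List (List String)) (server : List Int) (first : Int) (out : List (List Int)) : Decidable (Spec_possible_slots dataCenter server first out) := by unfold Spec_possible_slots; infer_instance

-- ===== CLAIM (what is proved, stated in full; the proofs are below) =====
def Claim_equal_possible_slots : Prop := ∀ (dataCenter : List (List String)) (server : List Int) (first : Int), Dom_possible_slots dataCenter server first → Pre_possible_slots dataCenter server first → Spec_possible_slots dataCenter server first (possible_slots dataCenter server first)

-- ===== LEMMAS AND PROOFS =====

-- spec-side free-run length of a row suffix
def freeRun : List String → Nat
  | [] => 0
  | c :: t => if c = "X" then 0 else freeRun t + 1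

theorem runsB_length (L : List String) : (runsB L).length = L.length := by
  induction L with
  | nil => rfl
  | cons c t ih => simp [runsB, ih]

theorem runsB_headD (L : List String) : (runsB L).headD 0 = freeRun L := by
  induction L with
  | nil => rfl
  | cons c t ih =>
    simp only [runsB, freeRun, List.headD_cons]
    rw [← ih]

theorem runsB_getD (L : List String) (i : Nat) :
    (runsB L).getD i 0 = freeRun (L.drop i) := by
  induction L generalizing i with
  | nil => cases i <;> rfl
  | cons c t ih =>
    cases i with
    | zero =>
      rw [List.drop_zero, ← runsB_headD]
      cases runsB (c :: t) <;> simp [List.getD, List.headD]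
    | succ j => simpa [runsB, List.getD] using ih j

theorem innerA_iff (r : List String) (nbSlots slot : Nat) (size : Int)
    (hlen : nbSlots ≤ r.length) (s : Int) (hs : 0 ≤ s) :
    innerA r nbSlots slot size s = size - 1 ↔
      size - s ≤ (freeRun ((r.take nbSlots).drop (slot + s.toNat)) : Int) := by
  suffices H : ∀ (n : Nat) (s : Int), 0 ≤ s → (size - s).toNat = n →
      (innerA r nbSlots slot size s = size - 1 ↔
        size - s ≤ (freeRun ((r.take nbSlots).drop (slot + s.toNat)) : Int)) from
    H _ s hs rfl
  intro n
  induction n with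
  | zero =>
    intro s hs hn
    have hlt : ¬ s < size := by omega
    rw [innerA, dif_neg hlt]
    constructor
    · intro _
      have : (0:Int) ≤ (freeRun ((r.take nbSlots).drop (slot + s.toNat)) : Int) := by positivity
      omega
    · intro _; rfl
  | succ n ih =>
    intro s hs hn
    have hlt : s < size := by omega
    rw [innerA, dif_pos hlt]
    by_cases hout : (nbSlots : Int) ≤ (slot : Int) + s
    · have hnil : (r.take nbSlots).drop (slot + s.toNat) = [] := by
        apply List.drop_eq_nil_of_le
        simp only [List.length_take]
        omega
      rw [if_pos (Or.inl hout), hnil]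
      simp only [freeRun]
      constructor
      · intro h; omega
      · intro h; simp at h; omega
    · have hidx : slot + s.toNat < nbSlots := by omega
      have hidxr : slot + s.toNat < r.length := lt_of_lt_of_le hidx hlen
      have hidxt : slot + s.toNat < (r.take nbSlots).length := by
        simp only [List.length_take]; omega
      have hdrop : (r.take nbSlots).drop (slot + s.toNat)
          = r[slot + s.toNat] :: (r.take nbSlots).drop (slot + s.toNat + 1) := by
        rw [List.drop_eq_getElem_cons hidxt]
        congr 1
        exact List.getElem_take
      have hgetD : r.getD ((slot : Int) + s).toNat "" = r[slot + s.toNat] := by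
        have he : ((slot : Int) + s).toNat = slot + s.toNat := by omega
        rw [he]
        exact List.getD_eq_getElem r "" hidxr
      by_cases hX : r[slot + s.toNat] = "X"
      · rw [if_pos (Or.inr (by rw [hgetD]; exact hX)), hdrop]
        simp only [freeRun, hX, if_pos]
        constructor
        · intro h; omega
        · intro h; simp at h; omega
      · rw [if_neg (by push Not; exact ⟨by omega, by rw [hgetD]; exact hX⟩)]
        have hrec := ih (s + 1) (by omega) (by omega)
        have he : slot + (s + 1).toNat = slot + s.toNat + 1 := by omega
        rw [he] at hrec
        rw [hrec, hdrop]
        simp only [freeRun, hX]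
        push_cast
        omega

theorem slotLoop_eq (dc : List (List String)) (row nbSlots : Nat) (size first : Int)
    (hr : nbSlots ≤ (dc.getD row []).length) :
    ∀ slot acc,
      slotLoopA dc row nbSlots size first slot acc
        = collectB row size first ((runsB ((dc.getD row []).take nbSlots)).drop slot) slot acc := by
  have hruns : (runsB ((dc.getD row []).take nbSlots)).length = nbSlots := by
    rw [runsB_length]
    simp only [List.length_take]
    omega
  suffices H : ∀ (n : Nat) (slot : Nat) (acc : List (List Int)), nbSlots - slot = n →
      slotLoopA dc row nbSlots size first slot acc
        = collectB row size first ((runsB ((dc.getD row []).take nbSlots)).drop slot) slot acc from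
    fun slot acc => H _ slot acc rfl
  intro n
  induction n with
  | zero =>
    intro slot acc hn
    have hge : ¬ slot < nbSlots := by omega
    rw [slotLoopA, dif_neg hge, List.drop_eq_nil_of_le (by omega)]
    rfl
  | succ n ih =>
    intro slot acc hn
    have hlt : slot < nbSlots := by omega
    have hlt' : slot < (runsB ((dc.getD row []).take nbSlots)).length := by omega
    have hcond : (innerA (dc.getD row []) nbSlots slot size 0 = size - 1) ↔
        (size ≤ (((runsB ((dc.getD row []).take nbSlots))[slot]'hlt' : Nat) : Int)) := by
      have h1 := innerA_iff (dc.getD row []) nbSlots slot size hr 0 le_rfl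
      have h2 : (runsB ((dc.getD row []).take nbSlots)).getD slot 0
          = (runsB ((dc.getD row []).take nbSlots))[slot]'hlt' :=
        List.getD_eq_getElem _ 0 hlt'
      rw [runsB_getD] at h2
      simp only [Int.toNat_zero, Nat.add_zero, sub_zero] at h1
      rw [h1, ← h2]
    rw [slotLoopA, dif_pos hlt, List.drop_eq_getElem_cons hlt']
    simp only [collectB]
    by_cases hc : innerA (dc.getD row []) nbSlots slot size 0 = size - 1
    · rw [if_pos hc, if_pos (hcond.mp hc)]
      split_ifs with hf
      · rfl
      · exact ih (slot + 1) _ (by omega)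
    · rw [if_neg hc, if_neg (fun h => hc (hcond.mpr h))]
      exact ih (slot + 1) _ (by omega)

theorem rowLoop_eq (dc : List (List String)) (nbSlots : Nat) (size first : Int)
    (h : ∀ r ∈ dc, nbSlots ≤ r.length) :
    ∀ row acc,
      rowLoopA dc dc.length nbSlots size first row acc
        = rowsB nbSlots size first (dc.drop row) row acc := by
  suffices H : ∀ (n : Nat) (row : Nat) (acc : List (List Int)), dc.length - row = n →
      rowLoopA dc dc.length nbSlots size first row acc
        = rowsB nbSlots size first (dc.drop row) row acc from
    fun row acc => H _ row acc rfl
  intro n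
  induction n with
  | zero =>
    intro row acc hn
    have hge : ¬ row < dc.length := by omega
    rw [rowLoopA, dif_neg hge, List.drop_eq_nil_of_le (by omega)]
    rfl
  | succ n ih =>
    intro row acc hn
    have hlt : row < dc.length := by omega
    have hget : dc.getD row [] = dc[row]'hlt := List.getD_eq_getElem dc [] hlt
    have hr : nbSlots ≤ (dc.getD row []).length := by
      rw [hget]; exact h _ (List.getElem_mem hlt)
    rw [rowLoopA, dif_pos hlt, List.drop_eq_getElem_cons hlt]
    simp only [rowsB]
    rw [slotLoop_eq dc row nbSlots size first hr 0 acc, List.drop_zero, hget]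
    cases collectB row size first (runsB ((dc[row]'hlt).take nbSlots)) 0 acc with
    | mk acc2 b =>
      cases b with
      | true => rfl
      | false => exact ih (row + 1) acc2 (by omega)

-- ===== VERDICT (by name: the statement is the Claim_ definition above) =====
theorem possible_slots_spec : Claim_equal_possible_slots := by
  intro dc server first _hdom hpre
  obtain ⟨hne, hlen2, hsz, hrows⟩ := hpre
  unfold Spec_possible_slots possible_slots possible_slots_alt
  have := rowLoop_eq dc (dc.headD []).length (PySem.List.pyGetD server 1 0) first hrows 0 []
  simpa using this
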